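-- pv_equiv track=rewrite | github.com/nykimberly/playground-python | coding-challenges/coderust/find_least_common_number.py | find_least_common_number
-- ===== SOURCE A (Python) =====
-- def find_least_common_number(arr1, arr2, arr3):
--     curr_max = 0
--     while arr1 and arr2 and arr3:
--         if arr1[0] == arr2[0] and arr2[0] == arr3[0]:
--             return arr1[0]
--         else:
--             curr_max = max(arr1[0], arr2[0], arr3[0])
--             if arr1[0] < curr_max:
--                 arr1.pop(0)
--             if arr2[0] < curr_max:
--                 arr2.pop(0)
--             if arr3[0] < curr_max:
--                 arr3.pop(0)
--     return -1
-- ===== SOURCE B (Python) =====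
-- def find_least_common_number(arr1, arr2, arr3):
--     i = j = k = 0
--     n1, n2, n3 = len(arr1), len(arr2), len(arr3)
--     while i < n1 and j < n2 and k < n3:
--         x, y, z = arr1[i], arr2[j], arr3[k]
--         if x == y == z:
--             return x
--         m = max(x, y, z)
--         if x < m:
--             i += 1
--         if y < m:
--             j += 1
--         if z < m:
--             k += 1
--     return -1
-- ===== Notes on version B (the rewrite author's own statement) =====
-- stated objective: faster
-- what changed: B replaces A's destructive pop(0) scan (each pop shifts the whole list) with three advancing indices over the unmodified lists, and B does not mutate its arguments.
import Mathlib
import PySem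

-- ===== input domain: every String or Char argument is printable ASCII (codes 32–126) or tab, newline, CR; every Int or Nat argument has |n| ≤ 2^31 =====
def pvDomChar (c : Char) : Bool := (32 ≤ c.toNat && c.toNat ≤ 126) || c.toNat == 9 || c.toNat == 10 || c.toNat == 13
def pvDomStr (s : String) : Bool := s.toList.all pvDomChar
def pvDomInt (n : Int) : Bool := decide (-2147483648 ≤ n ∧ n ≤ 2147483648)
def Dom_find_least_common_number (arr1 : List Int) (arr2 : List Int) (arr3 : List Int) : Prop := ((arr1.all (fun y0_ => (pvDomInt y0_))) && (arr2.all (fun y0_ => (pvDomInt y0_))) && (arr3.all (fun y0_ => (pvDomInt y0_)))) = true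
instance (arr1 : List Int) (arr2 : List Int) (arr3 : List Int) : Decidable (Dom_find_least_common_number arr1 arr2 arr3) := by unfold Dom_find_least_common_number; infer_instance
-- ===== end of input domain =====

-- B replaces A's destructive pop(0) loop with three advancing indices over the unmodified
-- lists (objective: faster; A mutates its arguments in place, B does not — the equivalence
-- proved here is about the return value).

-- ===== PORT A =====
-- literal transliteration of A's while loop: the pops become recursion on the lists,
-- totalized with a fuel counter that is large enough (each iteration pops at least one head)
def goA : Nat → List Int → List Int → List Int → Int
  | 0, _, _, _ => -1
  | n + 1, x :: xs, y :: ys, z :: zs =>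
      if x = y ∧ y = z then x
      else
        goA n (if x < max x (max y z) then xs else x :: xs)
              (if y < max x (max y z) then ys else y :: ys)
              (if z < max x (max y z) then zs else z :: zs)
  | _ + 1, _, _, _ => -1

def find_least_common_number (arr1 : List Int) (arr2 : List Int) (arr3 : List Int) : Int :=
  goA (arr1.length + arr2.length + arr3.length + 1) arr1 arr2 arr3

-- ===== PORT B =====
-- literal transliteration of Source B: three indices advance over the fixed lists,
-- totalized with the same fuel counter
def goB (arr1 arr2 arr3 : List Int) : Nat → Nat → Nat → Nat → Int
  | 0, _, _, _ => -1
  | n + 1, i, j, k =>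
      if h : i < arr1.length ∧ j < arr2.length ∧ k < arr3.length then
        if arr1[i]'h.1 = arr2[j]'h.2.1 ∧ arr2[j]'h.2.1 = arr3[k]'h.2.2 then arr1[i]'h.1
        else
          goB arr1 arr2 arr3 n
            (if arr1[i]'h.1 < max (arr1[i]'h.1) (max (arr2[j]'h.2.1) (arr3[k]'h.2.2)) then i + 1 else i)
            (if arr2[j]'h.2.1 < max (arr1[i]'h.1) (max (arr2[j]'h.2.1) (arr3[k]'h.2.2)) then j + 1 else j)
            (if arr3[k]'h.2.2 < max (arr1[i]'h.1) (max (arr2[j]'h.2.1) (arr3[k]'h.2.2)) then k + 1 else k)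
      else -1

def find_least_common_number_alt (arr1 : List Int) (arr2 : List Int) (arr3 : List Int) : Int :=
  goB arr1 arr2 arr3 (arr1.length + arr2.length + arr3.length + 1) 0 0 0

-- ===== PRECONDITION & SPEC =====
def Spec_find_least_common_number (arr1 : List Int) (arr2 : List Int) (arr3 : List Int) (out : Int) : Prop := out = find_least_common_number_alt arr1 arr2 arr3
instance (arr1 : List Int) (arr2 : List Int) (arr3 : List Int) (out : Int) : Decidable (Spec_find_least_common_number arr1 arr2 arr3 out) := by unfold Spec_find_least_common_number; infer_instance

-- ===== CLAIM (what is proved, stated in full; the proofs are below) =====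
def Claim_equal_find_least_common_number : Prop := ∀ (arr1 : List Int) (arr2 : List Int) (arr3 : List Int), Dom_find_least_common_number arr1 arr2 arr3 → Spec_find_least_common_number arr1 arr2 arr3 (find_least_common_number arr1 arr2 arr3)

-- ===== LEMMAS AND PROOFS =====

-- B at indices (i,j,k) computes, with the same fuel, what A computes on the three suffixes
theorem goB_eq_goA (arr1 arr2 arr3 : List Int) (n i j k : Nat) :
    goB arr1 arr2 arr3 n i j k = goA n (arr1.drop i) (arr2.drop j) (arr3.drop k) := by
  induction n generalizing i j k with
  | zero => rfl
  | succ n ih =>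
      rw [goB]
      split
      · rename_i h
        rw [List.drop_eq_getElem_cons h.1, List.drop_eq_getElem_cons h.2.1,
            List.drop_eq_getElem_cons h.2.2, goA]
        by_cases hc : arr1[i]'h.1 = arr2[j]'h.2.1 ∧ arr2[j]'h.2.1 = arr3[k]'h.2.2
        · rw [if_pos hc, if_pos hc]
        · rw [if_neg hc, if_neg hc, ih]
          congr 1 <;> split_ifs <;>
            first
            | rfl
            | exact List.drop_eq_getElem_cons (by omega)
      · rename_i h
        rcases Nat.lt_or_ge i arr1.length with h1 | h1
        · rcases Nat.lt_or_ge j arr2.length with h2 | h2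
          · have h3 : arr3.length ≤ k := by
              rcases Nat.lt_or_ge k arr3.length with h3 | h3
              · exact absurd ⟨h1, h2, h3⟩ h
              · exact h3
            rw [List.drop_eq_nil_of_le h3]
            rcases arr1.drop i with _ | _ <;> rcases arr2.drop j with _ | _ <;> rfl
          · rw [List.drop_eq_nil_of_le h2]
            rcases arr1.drop i with _ | _ <;> rfl
        · rw [List.drop_eq_nil_of_le h1]
          rfl

-- ===== VERDICT (by name: the statement is the Claim_ definition above) =====
theorem find_least_common_number_spec : Claim_equal_find_least_common_number := by
  intro arr1 arr2 arr3 _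
  unfold Spec_find_least_common_number find_least_common_number find_least_common_number_alt
  rw [goB_eq_goA]
  simp
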